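-- pv_equiv track=rewrite | github.com/MrBrantCode/unitest_baseline | mut_generate/mist_train_taco/taco_6652/solution.py | max_digit_product
-- ===== SOURCE A (Python) =====
-- def max_digit_product(n: int) -> int:
--     """
--     Finds the maximum possible product of digits among all integers from 1 to n.
--
--     Parameters:
--     n (int): The upper limit for finding the maximum digit product.
--
--     Returns:
--     int: The maximum product of digits found among all integers from 1 to n.
--     """
--
--     def product_of_digits(num: int) -> int:
--         """Helper function to calculate the product of digits of a number."""
--         product = 1
--         while num != 0:
--             product *= num % 10
--             num //= 10
--         return product
--
--     if n < 10:
--         return n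
--
--     max_product = product_of_digits(n)
--     past_product = 1
--
--     while n != 0:
--         while n % 10 != 9 and len(str(n)) != 1:
--             n -= 1
--         max_product = max(max_product, product_of_digits(n) * past_product)
--         past_product *= n % 10
--         n //= 10
--
--     return max_product
-- ===== SOURCE B (Python) =====
-- def max_digit_product(n: int) -> int:
--     """Max product of digits among 1..n (returns n itself for n < 10)."""
--
--     def product_of_digits(num: int) -> int:
--         product = 1
--         while num != 0:
--             product *= num % 10
--             num //= 10
--         return product
--
--     def best(m: int) -> int:
--         # max digit product over 1..m, via the recursion:
--         # either the last digit is free (prefix < m//10, best ends in 9),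
--         # or the prefix is exactly m//10 (last digit at most m%10).
--         if m < 10:
--             return m
--         q, r = m // 10, m % 10
--         smaller = 1 if q == 1 else best(q - 1)
--         return max(9 * smaller, r * product_of_digits(q))
--
--     return best(n)
-- ===== Notes on version B (the rewrite author's own statement) =====
-- stated objective: alternative
-- what changed: Replaces A's imperative greedy (decrement n until its last digit is 9, walking digit positions with a running suffix product and a mutable max) by a top-down recursion on the prefix: best(m) = max(9*best(m//10 - 1), (m%10)*product_of_digits(m//10)), with no decrement loop, no len(str(n)) test and no accumulators.
import Mathlib
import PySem

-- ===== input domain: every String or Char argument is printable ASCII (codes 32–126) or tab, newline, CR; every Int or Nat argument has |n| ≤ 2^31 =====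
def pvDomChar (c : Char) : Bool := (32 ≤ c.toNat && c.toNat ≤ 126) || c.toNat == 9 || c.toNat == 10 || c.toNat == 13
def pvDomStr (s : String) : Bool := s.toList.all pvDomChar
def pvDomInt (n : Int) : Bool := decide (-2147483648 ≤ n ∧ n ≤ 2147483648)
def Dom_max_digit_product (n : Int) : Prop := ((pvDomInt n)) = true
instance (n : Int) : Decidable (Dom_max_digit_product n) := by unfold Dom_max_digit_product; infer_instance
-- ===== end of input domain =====

-- B re-implements A's greedy digit walk as a direct recursion best(m) = max(9*best(m//10-1), (m%10)*prod_digits(m//10)); same values, different algorithm (objective: alternative).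

-- ===== PORT A =====

theorem podDec (num : Int) (h : ¬ num ≤ 0) :
    (PySem.Int.floordiv num 10).toNat < num.toNat := by
  rw [PySem.Int.floordiv_eq_ediv_of_pos (by norm_num)]
  omega

def podLoopA (num product : Int) : Int :=
  if num ≤ 0 then product
  else podLoopA (PySem.Int.floordiv num 10) (product * PySem.Int.mod num 10)
termination_by num.toNat
decreasing_by exact podDec num (by assumption)

def productOfDigitsA (num : Int) : Int := podLoopA num 1

theorem decDec (n : Int) (h : PySem.Int.mod n 10 ≠ 9) :
    ((PySem.Int.mod (n - 1) 10 + 1) % 10).toNat < ((PySem.Int.mod n 10 + 1) % 10).toNat := by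
  rw [PySem.Int.mod_eq_emod_of_pos (by norm_num), PySem.Int.mod_eq_emod_of_pos (by norm_num)] at *
  have hb1 : 0 ≤ n % 10 := Int.emod_nonneg n (by norm_num)
  have hb2 : n % 10 < 10 := Int.emod_lt_of_pos n (by norm_num)
  rw [Int.sub_emod n 1 10, show (1:Int) % 10 = 1 from rfl]
  generalize n % 10 = r at *
  interval_cases r <;> first | decide | (exact absurd rfl h)

def decLoopA (n : Int) : Int :=
  if PySem.Int.mod n 10 ≠ 9 ∧ PySem.Str.len (PySem.Int.toStr n) ≠ 1 then decLoopA (n - 1)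
  else n
termination_by ((PySem.Int.mod n 10 + 1) % 10).toNat
decreasing_by exact decDec n (by exact (by assumption : _ ∧ _).1)

theorem decLoopA_le (n : Int) : decLoopA n ≤ n := by
  rw [decLoopA.eq_def]
  split
  · have := decLoopA_le (n - 1); omega
  · exact le_refl n
termination_by ((PySem.Int.mod n 10 + 1) % 10).toNat
decreasing_by exact decDec n (by exact (by assumption : _ ∧ _).1)

theorem outerDec (n : Int) (h : ¬ n ≤ 0) :
    (PySem.Int.floordiv (decLoopA n) 10).toNat < n.toNat := by
  have hle := decLoopA_le n
  rw [PySem.Int.floordiv_eq_ediv_of_pos (by norm_num)]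
  have h2 : decLoopA n / 10 ≤ n / 10 := Int.ediv_le_ediv (by norm_num) hle
  omega

def outerLoopA (n maxp past : Int) : Int :=
  if n ≤ 0 then maxp
  else
    let m := decLoopA n
    outerLoopA (PySem.Int.floordiv m 10) (max maxp (productOfDigitsA m * past))
      (past * PySem.Int.mod m 10)
termination_by n.toNat
decreasing_by exact outerDec n (by assumption)

def max_digit_product (n : Int) : Int :=
  if n < 10 then n
  else outerLoopA n (productOfDigitsA n) 1

-- ===== PORT B =====
def podLoopB (num product : Int) : Int :=
  if num ≤ 0 then product
  else podLoopB (PySem.Int.floordiv num 10) (product * PySem.Int.mod num 10)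
termination_by num.toNat
decreasing_by exact podDec num (by assumption)

def productOfDigitsB (num : Int) : Int := podLoopB num 1

theorem bestDec (m : Int) (h : ¬ m < 10) :
    (PySem.Int.floordiv m 10 - 1).toNat < m.toNat := by
  rw [PySem.Int.floordiv_eq_ediv_of_pos (by norm_num)]
  omega

def bestB (m : Int) : Int :=
  if m < 10 then m
  else
    let q := PySem.Int.floordiv m 10
    let r := PySem.Int.mod m 10
    let smaller := if q = 1 then 1 else bestB (q - 1)
    max (9 * smaller) (r * productOfDigitsB q)
termination_by m.toNat
decreasing_by exact bestDec m (by assumption)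

def max_digit_product_alt (n : Int) : Int := bestB n

-- ===== PRECONDITION & SPEC =====
def Spec_max_digit_product (n : Int) (out : Int) : Prop := out = max_digit_product_alt n
instance (n : Int) (out : Int) : Decidable (Spec_max_digit_product n out) := by
  unfold Spec_max_digit_product; infer_instance

-- ===== CLAIM (what is proved, stated in full; the proofs are below) =====
def Claim_equal_max_digit_product : Prop :=
  ∀ (n : Int), Dom_max_digit_product n → Spec_max_digit_product n (max_digit_product n)

-- ===== LEMMAS AND PROOFS =====
-- bridges
theorem div10 (a : Int) : PySem.Int.floordiv a 10 = a / 10 :=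
  PySem.Int.floordiv_eq_ediv_of_pos (by norm_num)

theorem mod10 (a : Int) : PySem.Int.mod a 10 = a % 10 :=
  PySem.Int.mod_eq_emod_of_pos (by norm_num)

-- pod lemmas
theorem podLoopA_step (num p : Int) (h : ¬ num ≤ 0) :
    podLoopA num p = podLoopA (PySem.Int.floordiv num 10) (p * PySem.Int.mod num 10) := by
  rw [podLoopA, if_neg h]

theorem podLoopA_stop (num p : Int) (h : num ≤ 0) : podLoopA num p = p := by
  rw [podLoopA, if_pos h]

theorem podLoopA_mul (num p : Int) : podLoopA num p = p * podLoopA num 1 := by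
  by_cases h : num ≤ 0
  · rw [podLoopA_stop _ _ h, podLoopA_stop _ _ h]; ring
  · rw [podLoopA_step num p h, podLoopA_step num 1 h,
      podLoopA_mul (PySem.Int.floordiv num 10) (p * PySem.Int.mod num 10),
      podLoopA_mul (PySem.Int.floordiv num 10) (1 * PySem.Int.mod num 10)]
    ring
termination_by num.toNat
decreasing_by
  all_goals rw [div10]; omega

theorem pod_zero : productOfDigitsA 0 = 1 := by
  rw [productOfDigitsA, podLoopA]; norm_num

theorem pod_step (num : Int) (h : 1 ≤ num) :
    productOfDigitsA num = num % 10 * productOfDigitsA (num / 10) := by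
  rw [productOfDigitsA, podLoopA, if_neg (by omega), div10, mod10, podLoopA_mul,
    productOfDigitsA]
  ring

theorem pod_digit (a b : Int) (ha : 0 ≤ a) (hb : 0 ≤ b) (hb9 : b ≤ 9)
    (h1 : 1 ≤ 10 * a + b) : productOfDigitsA (10 * a + b) = b * productOfDigitsA a := by
  rw [pod_step _ h1]
  have e1 : (10 * a + b) % 10 = b := by omega
  have e2 : (10 * a + b) / 10 = a := by omega
  rw [e1, e2]

theorem pod_small (n : Int) (h1 : 1 ≤ n) (h9 : n ≤ 9) : productOfDigitsA n = n := by
  have := pod_digit 0 n (by omega) (by omega) (by omega) (by omega)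
  simpa [pod_zero] using this

theorem pod_nonneg (num : Int) (h : 0 ≤ num) : 0 ≤ productOfDigitsA num := by
  by_cases h0 : num = 0
  · rw [h0, pod_zero]; norm_num
  · rw [pod_step num (by omega)]
    have h1 : 0 ≤ productOfDigitsA (num / 10) := pod_nonneg (num / 10) (by omega)
    have h2 : 0 ≤ num % 10 := by omega
    positivity
termination_by num.toNat
decreasing_by omega

theorem podB_eq (num p : Int) : podLoopB num p = podLoopA num p := by
  by_cases h : num ≤ 0
  · rw [podLoopB, if_pos h, podLoopA_stop _ _ h]
  · rw [podLoopB, if_neg h, podB_eq (PySem.Int.floordiv num 10) (p * PySem.Int.mod num 10),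
      podLoopA_step num p h]
termination_by num.toNat
decreasing_by rw [div10]; omega

-- string-length facts about str(n)
theorem toDigitsCore_len_ge (f : Nat) : ∀ (n : Nat) (ds : List Char),
    ds.length ≤ (Nat.toDigitsCore 10 f n ds).length := by
  induction f with
  | zero => intro n ds; simp [Nat.toDigitsCore]
  | succ f ih =>
    intro n ds
    rw [Nat.toDigitsCore]
    split
    · simp
    · exact le_trans (by simp) (ih (n / 10) _)

theorem toDigitsCore_len_ge_succ (f n : Nat) (ds : List Char) :
    ds.length + 1 ≤ (Nat.toDigitsCore 10 (f + 1) n ds).length := by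
  rw [Nat.toDigitsCore]
  split
  · simp
  · exact le_trans (by simp) (toDigitsCore_len_ge f (n / 10) _)

theorem len_toStr_ne_one (n : Int) (h : 10 ≤ n) :
    PySem.Str.len (PySem.Int.toStr n) ≠ 1 := by
  rw [PySem.Str.len]
  rw [PySem.Int.toList_toStr]
  rw [PySem.Int.toChars]
  rw [if_neg (by omega)]
  rw [Nat.toDigits]
  obtain ⟨m, hm⟩ : ∃ m, n.toNat = m + 10 := ⟨n.toNat - 10, by omega⟩
  rw [hm]
  rw [Nat.toDigitsCore]
  rw [if_neg (by omega)]
  have h2 := toDigitsCore_len_ge_succ (m + 9) ((m + 10) / 10) [((m + 10) % 10).digitChar]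
  rw [show m + 9 + 1 = m + 10 by omega] at h2
  simp only [List.length_singleton] at h2
  omega

theorem len_toStr_small (n : Int) (h0 : 0 ≤ n) (h9 : n ≤ 9) :
    PySem.Str.len (PySem.Int.toStr n) = 1 := by
  interval_cases n <;> decide

-- decLoopA characterisation
theorem decLoopA_stop9 (n : Int) (h : n % 10 = 9) : decLoopA n = n := by
  rw [decLoopA.eq_def, if_neg]
  rw [mod10]
  intro hc
  exact hc.1 h

theorem decLoopA_small (n : Int) (h0 : 0 ≤ n) (h9 : n ≤ 9) : decLoopA n = n := by
  rw [decLoopA.eq_def, if_neg]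
  intro hc
  exact hc.2 (len_toStr_small n h0 h9)

theorem decLoopA_eq (n : Int) (h : 10 ≤ n) :
    decLoopA n = if n % 10 = 9 then n else 10 * (n / 10) - 1 := by
  by_cases h9 : n % 10 = 9
  · rw [if_pos h9, decLoopA_stop9 n h9]
  · rw [if_neg h9]
    rw [decLoopA.eq_def, if_pos ⟨by rw [mod10]; exact h9, len_toStr_ne_one n h⟩]
    by_cases h0 : n % 10 = 0
    · rw [decLoopA_stop9 (n - 1) (by omega)]
      omega
    · rw [decLoopA_eq (n - 1) (by omega)]
      rw [if_neg (by omega)]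
      have : (n - 1) / 10 = n / 10 := by omega
      rw [this]
termination_by ((n % 10 + 1) % 10).toNat
decreasing_by omega

-- the specification: Rfun n = max of digit products over 1..n (for n ≥ 1)
def Rfun (n : Int) : Int :=
  if n ≤ 1 then 1 else max (Rfun (n - 1)) (productOfDigitsA n)
termination_by n.toNat
decreasing_by omega

theorem Rfun_one : Rfun 1 = 1 := by rw [Rfun]; norm_num

theorem Rfun_step (n : Int) (h : 2 ≤ n) :
    Rfun n = max (Rfun (n - 1)) (productOfDigitsA n) := by
  rw [Rfun.eq_def, if_neg (by omega)]

theorem Rfun_ge_pod (n k : Int) (h1 : 1 ≤ k) (hk : k ≤ n) :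
    productOfDigitsA k ≤ Rfun n := by
  by_cases h : n ≤ 1
  · have hk1 : k = 1 := by omega
    rw [hk1, pod_small 1 (by norm_num) (by norm_num)]
    rw [show n = 1 by omega, Rfun_one]
  · rw [Rfun_step n (by omega)]
    by_cases hkn : k = n
    · rw [hkn]; exact le_max_right _ _
    · exact le_trans (Rfun_ge_pod (n - 1) k h1 (by omega)) (le_max_left _ _)
termination_by n.toNat
decreasing_by omega

theorem Rfun_pos (n : Int) (h : 1 ≤ n) : 1 ≤ Rfun n := by
  have := Rfun_ge_pod n 1 (by norm_num) h
  rwa [pod_small 1 (by norm_num) (by norm_num)] at this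

theorem Rfun_exists (n : Int) (h : 1 ≤ n) :
    ∃ k, 1 ≤ k ∧ k ≤ n ∧ Rfun n = productOfDigitsA k := by
  by_cases h1 : n ≤ 1
  · exact ⟨1, by norm_num, by omega, by
      rw [show n = 1 by omega, Rfun_one, pod_small 1 (by norm_num) (by norm_num)]⟩
  · obtain ⟨k, hk1, hk2, hk3⟩ := Rfun_exists (n - 1) (by omega)
    rw [Rfun_step n (by omega)]
    rcases le_total (Rfun (n - 1)) (productOfDigitsA n) with hc | hc
    · exact ⟨n, by omega, le_refl n, max_eq_right hc⟩
    · exact ⟨k, hk1, by omega, by rw [max_eq_left hc]; exact hk3⟩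
termination_by n.toNat
decreasing_by omega

theorem Rfun_small (n : Int) (h1 : 1 ≤ n) (h9 : n ≤ 9) : Rfun n = n := by
  by_cases h : n ≤ 1
  · rw [show n = 1 by omega, Rfun_one]
  · rw [Rfun_step n (by omega), Rfun_small (n - 1) (by omega) (by omega),
      pod_small n h1 h9]
    omega
termination_by n.toNat
decreasing_by omega

-- the key recursion satisfied by the brute-force maximum
theorem Rfun_rec (n : Int) (h : 10 ≤ n) :
    Rfun n = max (9 * (if n / 10 = 1 then 1 else Rfun (n / 10 - 1)))
               (n % 10 * productOfDigitsA (n / 10)) := by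
  have hq : 1 ≤ n / 10 := by omega
  have hs : 1 ≤ (if n / 10 = 1 then 1 else Rfun (n / 10 - 1)) := by
    split
    · norm_num
    · exact Rfun_pos _ (by omega)
  apply le_antisymm
  · -- every digit product of k ∈ [1, n] is bounded by the RHS
    obtain ⟨k, hk1, hkn, hke⟩ := Rfun_exists n (by omega)
    rw [hke]
    have hb0 : 0 ≤ k % 10 := by omega
    have hb9 : k % 10 ≤ 9 := by omega
    have hsplit : k = 10 * (k / 10) + k % 10 := by omega
    have hpk : productOfDigitsA k = k % 10 * productOfDigitsA (k / 10) := by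
      conv_lhs => rw [hsplit]
      rw [pod_digit (k / 10) (k % 10) (by omega) hb0 hb9 (by omega)]
    by_cases ha0 : k / 10 = 0
    · -- single-digit k
      have : productOfDigitsA k = k := pod_small k hk1 (by omega)
      rw [this]
      refine le_trans ?_ (le_max_left _ _)
      nlinarith
    · by_cases haq : k / 10 = n / 10
      · -- same prefix as n: last digit at most n % 10
        have hbr : k % 10 ≤ n % 10 := by omega
        rw [hpk, haq]
        refine le_trans ?_ (le_max_right _ _)
        exact mul_le_mul_of_nonneg_right hbr (pod_nonneg _ (by omega))
      · -- strictly smaller prefix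
        have ha1 : 1 ≤ k / 10 := by omega
        have haq' : k / 10 ≤ n / 10 - 1 := by omega
        have hq2 : ¬ (n / 10 = 1) := by omega
        rw [hpk]
        refine le_trans ?_ (le_max_left _ _)
        rw [if_neg hq2]
        calc k % 10 * productOfDigitsA (k / 10)
            ≤ 9 * productOfDigitsA (k / 10) :=
              mul_le_mul_of_nonneg_right hb9 (pod_nonneg _ (by omega))
          _ ≤ 9 * Rfun (n / 10 - 1) := by
              have := Rfun_ge_pod (n / 10 - 1) (k / 10) ha1 haq'
              linarith
  · -- both candidates are digit products of numbers ≤ n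
    apply max_le
    · by_cases hq1 : n / 10 = 1
      · rw [if_pos hq1]
        have h9 : productOfDigitsA 9 = 9 := pod_small 9 (by norm_num) (by norm_num)
        have := Rfun_ge_pod n 9 (by norm_num) (by omega)
        omega
      · rw [if_neg hq1]
        obtain ⟨a, ha1, ha2, hae⟩ := Rfun_exists (n / 10 - 1) (by omega)
        rw [hae]
        have hpd : productOfDigitsA (10 * a + 9) = 9 * productOfDigitsA a :=
          pod_digit a 9 (by omega) (by norm_num) (by norm_num) (by omega)
        rw [← hpd]
        exact Rfun_ge_pod n (10 * a + 9) (by omega) (by omega)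
    · have hsplit : n = 10 * (n / 10) + n % 10 := by omega
      have hpd : productOfDigitsA n = n % 10 * productOfDigitsA (n / 10) := by
        conv_lhs => rw [hsplit]
        rw [pod_digit (n / 10) (n % 10) (by omega) (by omega) (by omega) (by omega)]
      rw [← hpd]
      exact Rfun_ge_pod n n (by omega) (le_refl n)

-- B computes the brute-force maximum
theorem bestB_eq_Rfun (n : Int) (h : 1 ≤ n) : bestB n = Rfun n := by
  by_cases h10 : n < 10
  · rw [bestB, if_pos h10, Rfun_small n h (by omega)]
  · rw [bestB, if_neg h10]
    simp only [div10, mod10]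
    rw [productOfDigitsB, podB_eq]
    rw [Rfun_rec n (by omega)]
    by_cases hq1 : n / 10 = 1
    · rw [if_pos hq1, if_pos hq1]
      rfl
    · rw [if_neg hq1, if_neg hq1, bestB_eq_Rfun (n / 10 - 1) (by omega)]
      rfl
termination_by n.toNat
decreasing_by omega

-- A's outer loop: step lemmas and candidate function
theorem outerLoopA_stop (n maxp past : Int) (h : n ≤ 0) : outerLoopA n maxp past = maxp := by
  rw [outerLoopA, if_pos h]

theorem outerLoopA_step (n maxp past : Int) (h : ¬ n ≤ 0) :
    outerLoopA n maxp past =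
      outerLoopA (PySem.Int.floordiv (decLoopA n) 10)
        (max maxp (productOfDigitsA (decLoopA n) * past))
        (past * PySem.Int.mod (decLoopA n) 10) := by
  rw [outerLoopA, if_neg h]

-- Gfun n = the maximum over the candidates A's loop generates from state n (past = 1)
def Gfun (n : Int) : Int :=
  if n ≤ 0 then 1
  else if n ≤ 9 then n
  else if n % 10 = 9 then max (productOfDigitsA n) (9 * Gfun (n / 10))
  else if n / 10 = 1 then 9
  else max (9 * productOfDigitsA (n / 10 - 1)) (9 * Gfun (n / 10 - 1))
termination_by n.toNat
decreasing_by all_goals omega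

-- Gfun step lemmas
theorem Gfun_small (n : Int) (h1 : 1 ≤ n) (h9 : n ≤ 9) : Gfun n = n := by
  rw [Gfun, if_neg (by omega), if_pos h9]

theorem Gfun_nine (n : Int) (h : 10 ≤ n) (hr : n % 10 = 9) :
    Gfun n = max (productOfDigitsA n) (9 * Gfun (n / 10)) := by
  rw [Gfun, if_neg (by omega), if_neg (by omega), if_pos hr]

theorem Gfun_dec1 (n : Int) (h : 10 ≤ n) (hr : ¬ n % 10 = 9) (hq : n / 10 = 1) :
    Gfun n = 9 := by
  rw [Gfun, if_neg (by omega), if_neg (by omega), if_neg hr, if_pos hq]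

theorem Gfun_dec (n : Int) (h : 10 ≤ n) (hr : ¬ n % 10 = 9) (hq : ¬ n / 10 = 1) :
    Gfun n = max (9 * productOfDigitsA (n / 10 - 1)) (9 * Gfun (n / 10 - 1)) := by
  rw [Gfun, if_neg (by omega), if_neg (by omega), if_neg hr, if_neg hq]

-- loop invariant: outerLoopA n maxp past = max maxp (past * Gfun n)  (n ≥ 1, past ≥ 0)
theorem outerLoopA_inv (n maxp past : Int) (h : 1 ≤ n) (hp : 0 ≤ past) :
    outerLoopA n maxp past = max maxp (past * Gfun n) := by
  rw [outerLoopA_step n maxp past (by omega)]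
  by_cases h9 : n ≤ 9
  · -- single-digit state: one more candidate, then the loop exits
    rw [decLoopA_small n (by omega) h9]
    rw [outerLoopA_stop _ _ _ (by rw [div10]; omega)]
    rw [pod_small n h h9, Gfun_small n h h9, mul_comm]
  · by_cases hr : n % 10 = 9
    · -- last digit already 9
      rw [decLoopA_stop9 n hr]
      rw [div10, mod10, hr]
      have IH := outerLoopA_inv (n / 10) (max maxp (productOfDigitsA n * past))
        (past * 9) (by omega) (by positivity)
      rw [IH, Gfun_nine n (by omega) hr, mul_max_of_nonneg _ _ hp, max_assoc]
      ring_nf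
    · -- decrement to the next …9 number
      have hd : decLoopA n = 10 * (n / 10) - 1 := by
        rw [decLoopA_eq n (by omega), if_neg hr]
      have hdq : decLoopA n / 10 = n / 10 - 1 := by omega
      have hd9 : decLoopA n % 10 = 9 := by omega
      have hpd : productOfDigitsA (decLoopA n) = 9 * productOfDigitsA (n / 10 - 1) := by
        rw [show decLoopA n = 10 * (n / 10 - 1) + 9 by omega]
        exact pod_digit _ 9 (by omega) (by norm_num) (by norm_num) (by omega)
      rw [div10, mod10, hdq, hd9, hpd]
      by_cases hq1 : n / 10 = 1
      · rw [outerLoopA_stop _ _ _ (by omega)]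
        rw [Gfun_dec1 n (by omega) hr hq1, hq1]
        rw [show (1:Int) - 1 = 0 by norm_num, pod_zero]
        ring_nf
      · have IH := outerLoopA_inv (n / 10 - 1)
          (max maxp (9 * productOfDigitsA (n / 10 - 1) * past)) (past * 9)
          (by omega) (by positivity)
        rw [IH, Gfun_dec n (by omega) hr hq1, mul_max_of_nonneg _ _ hp, max_assoc]
        ring_nf
termination_by n.toNat
decreasing_by all_goals omega

-- together with the initial candidate productOfDigitsA n, A's loop reaches the maximum
theorem max_pod_Gfun (n : Int) (h : 1 ≤ n) :
    max (productOfDigitsA n) (Gfun n) = Rfun n := by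
  by_cases h9 : n ≤ 9
  · rw [pod_small n h h9, Gfun_small n h h9, Rfun_small n h h9, max_self]
  · have hq : 1 ≤ n / 10 := by omega
    by_cases hr : n % 10 = 9
    · have hpd : productOfDigitsA n = 9 * productOfDigitsA (n / 10) := by
        conv_lhs => rw [show n = 10 * (n / 10) + 9 by omega]
        exact pod_digit (n / 10) 9 (by omega) (by norm_num) (by norm_num) (by omega)
      rw [Gfun_nine n (by omega) hr, ← max_assoc, max_self, hpd,
        ← mul_max_of_nonneg _ _ (by norm_num : (0:Int) ≤ 9),
        max_pod_Gfun (n / 10) hq, Rfun_rec n (by omega), hr]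
      by_cases hq1 : n / 10 = 1
      · rw [if_pos hq1, hq1, Rfun_one, pod_small 1 (by norm_num) (by norm_num)]
        norm_num
      · have h2 : 2 ≤ n / 10 := by omega
        rw [if_neg hq1, Rfun_step (n / 10) h2,
          ← mul_max_of_nonneg _ _ (by norm_num : (0:Int) ≤ 9)]
    · have hpd : productOfDigitsA n = n % 10 * productOfDigitsA (n / 10) := by
        conv_lhs => rw [show n = 10 * (n / 10) + n % 10 by omega]
        exact pod_digit (n / 10) (n % 10) (by omega) (by omega) (by omega) (by omega)
      rw [Rfun_rec n (by omega)]
      by_cases hq1 : n / 10 = 1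
      · rw [Gfun_dec1 n (by omega) hr hq1, if_pos hq1, hpd, hq1,
          pod_small 1 (by norm_num) (by norm_num), mul_one,
          show (9:Int) * 1 = 9 by norm_num]
        exact max_comm _ _
      · rw [Gfun_dec n (by omega) hr hq1,
          ← mul_max_of_nonneg _ _ (by norm_num : (0:Int) ≤ 9),
          max_pod_Gfun (n / 10 - 1) (by omega), if_neg hq1, hpd, max_comm]
termination_by n.toNat
decreasing_by all_goals omega

theorem final (n : Int) : max_digit_product n = bestB n := by
  by_cases h : n < 10
  · rw [max_digit_product, if_pos h, bestB, if_pos h]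
  · rw [max_digit_product, if_neg h,
      outerLoopA_inv n (productOfDigitsA n) 1 (by omega) (by norm_num), one_mul,
      max_pod_Gfun n (by omega), bestB_eq_Rfun n (by omega)]

-- ===== VERDICT (by name: the statement is the Claim_ definition above) =====
theorem max_digit_product_spec : Claim_equal_max_digit_product := by
  intro n _
  unfold Spec_max_digit_product max_digit_product_alt
  exact final n
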